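-- pv_equiv track=rewrite | github.com/akdlxm39/Baekjoon-algorithm | 백준/Gold/12906. 새로운 하노이 탑/새로운 하노이 탑.py | bfs
-- ===== SOURCE A (Python) =====
-- from collections import deque
--
-- def check(a, b, c):
--     for x in a:
--         if x != 'A':
--             return False
--     for x in b:
--         if x != 'B':
--             return False
--     for x in c:
--         if x != 'C':
--             return False
--     return True
--
-- def bfs(hanoi:tuple[str,str,str]):
--     queue = deque([(hanoi, 0)])
--     visited = {hanoi}
--     while queue:
--         (cur_a, cur_b, cur_c), cnt = queue.popleft()
--         if check(cur_a, cur_b, cur_c):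
--             return cnt
--         if cur_a != '':
--             nxt_a, tmp = cur_a[:-1], cur_a[-1]
--             nxt = (nxt_a, cur_b+tmp, cur_c)
--             if nxt not in visited:
--                 visited.add(nxt)
--                 queue.append((nxt, cnt + 1))
--             nxt = (nxt_a, cur_b, cur_c+tmp)
--             if nxt not in visited:
--                 visited.add(nxt)
--                 queue.append((nxt, cnt + 1))
--         if cur_b != '':
--             nxt_b, tmp = cur_b[:-1], cur_b[-1]
--             nxt = (cur_a+tmp, nxt_b, cur_c)
--             if nxt not in visited:
--                 visited.add(nxt)
--                 queue.append((nxt, cnt + 1))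
--             nxt = (cur_a, nxt_b, cur_c+tmp)
--             if nxt not in visited:
--                 visited.add(nxt)
--                 queue.append((nxt, cnt + 1))
--         if cur_c != '':
--             nxt_c, tmp = cur_c[:-1], cur_c[-1]
--             nxt = (cur_a+tmp, cur_b, nxt_c)
--             if nxt not in visited:
--                 visited.add(nxt)
--                 queue.append((nxt, cnt + 1))
--             nxt = (cur_a, cur_b+tmp, nxt_c)
--             if nxt not in visited:
--                 visited.add(nxt)
--                 queue.append((nxt, cnt + 1))
-- ===== SOURCE B (Python) =====
-- def bfs(hanoi: tuple[str, str, str]):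
--     # Reachable-set saturation: grow the ball of all states reachable in <= d
--     # moves, one radius per round; return the first radius containing a sorted
--     # state, or None when the ball stops growing (fixpoint) without one.
--     if any(ch not in 'ABC' for ch in hanoi[0] + hanoi[1] + hanoi[2]):
--         return None  # no reachable state can ever be sorted
--     reach = {hanoi}
--     d = 0
--     while True:
--         if any(_sorted_state(s) for s in reach):
--             return d
--         grown = reach.union(t for s in reach for t in _moves(s))
--         if len(grown) == len(reach):
--             return None
--         reach = grown
--         d += 1
--
-- def _sorted_state(s):
--     a, b, c = s
--     return all(x == 'A' for x in a) and all(x == 'B' for x in b) and all(x == 'C' for x in c)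
--
-- def _moves(s):
--     pa, pb, pc = s
--     out = []
--     if pa:
--         h, t = pa[:-1], pa[-1]
--         out += [(h, pb + t, pc), (h, pb, pc + t)]
--     if pb:
--         h, t = pb[:-1], pb[-1]
--         out += [(pa + t, h, pc), (pa, h, pc + t)]
--     if pc:
--         h, t = pc[:-1], pc[-1]
--         out += [(pa + t, pb, h), (pa, pb + t, h)]
--     return out
-- ===== Notes on version B (the rewrite author's own statement) =====
-- stated objective: alternative
-- what changed: Replaces the FIFO-queue BFS carrying (state, count) pairs and a side visited set by a reachable-set saturation: after an immediate None when a non-ABC character makes the sorted goal unreachable, the ball of states reachable in at most d moves is grown one radius per round by re-expanding the whole set, returning the first radius containing a sorted state and None at a fixpoint.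
import Mathlib
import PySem

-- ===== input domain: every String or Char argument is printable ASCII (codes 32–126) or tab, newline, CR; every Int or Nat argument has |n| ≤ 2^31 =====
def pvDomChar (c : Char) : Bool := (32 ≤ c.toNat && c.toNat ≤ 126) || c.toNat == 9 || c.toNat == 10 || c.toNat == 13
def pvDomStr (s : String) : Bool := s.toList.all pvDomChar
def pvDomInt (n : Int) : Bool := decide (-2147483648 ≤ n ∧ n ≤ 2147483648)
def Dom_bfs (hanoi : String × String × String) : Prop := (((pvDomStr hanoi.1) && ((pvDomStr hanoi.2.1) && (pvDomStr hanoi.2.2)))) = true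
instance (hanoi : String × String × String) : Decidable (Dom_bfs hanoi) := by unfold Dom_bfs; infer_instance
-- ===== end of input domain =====

-- B replaces A's FIFO-queue BFS (states paired with counts, plus a side visited set) by a
-- reachable-set saturation: the ball of states reachable in ≤ d moves is regrown one radius
-- per round until it contains a sorted state or hits a fixpoint (objective: alternative).

-- A state: the three pegs.  Python's visited set of states is modelled by Std.HashSet.
abbrev St : Type := String × String × String
abbrev VSet : Type := Std.HashSet St

def charsOf (s : St) : List Char := s.1.toList ++ s.2.1.toList ++ s.2.2.toList

-- Fuel (totality device only; both loops terminate because the set of known states grows inside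
-- the finite space of states made from the input's characters — `fuelFor` over-counts that space).
def sizeLists : Nat → Nat → Nat
  | 0, _ => 1
  | n + 1, k => 1 + k * sizeLists n k

def fuelFor (orig : List Char) : Nat :=
  2 * (sizeLists orig.length (PySem.List.dedup orig).length) ^ 3 + 2

-- ===== PORT A =====
def checkA (a b c : String) : Bool :=
  a.toList.all (fun x => x == 'A') && b.toList.all (fun x => x == 'B') &&
    c.toList.all (fun x => x == 'C')

def pushA (cnt : Int) (qv : List (St × Int) × VSet) (s : St) : List (St × Int) × VSet :=
  if s ∈ qv.2 then qv else (qv.1 ++ [(s, cnt + 1)], qv.2.insert s)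

-- the six `queue.append` candidates of one popped state, in A's order (appended entries, visited)
def stepA (a b c : String) (cnt : Int) (v : VSet) : List (St × Int) × VSet :=
  let qv : List (St × Int) × VSet := ([], v)
  let qv := if a ≠ "" then
      pushA cnt (pushA cnt qv
          (String.ofList a.toList.dropLast, b.push (a.toList.getLastD 'A'), c))
        (String.ofList a.toList.dropLast, b, c.push (a.toList.getLastD 'A'))
    else qv
  let qv := if b ≠ "" then
      pushA cnt (pushA cnt qv
          (a.push (b.toList.getLastD 'A'), String.ofList b.toList.dropLast, c))
        (a, String.ofList b.toList.dropLast, c.push (b.toList.getLastD 'A'))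
    else qv
  let qv := if c ≠ "" then
      pushA cnt (pushA cnt qv
          (a.push (c.toList.getLastD 'A'), b, String.ofList c.toList.dropLast))
        (a, b.push (c.toList.getLastD 'A'), String.ofList c.toList.dropLast)
    else qv
  qv

def abfs : Nat → List (St × Int) → VSet → Option Int
  | 0, _, _ => none
  | _ + 1, [], _ => none
  | f + 1, ((a, b, c), cnt) :: rest, v =>
    if checkA a b c then some cnt
    else
      let nv := stepA a b c cnt v
      abfs f (rest ++ nv.1) nv.2

def bfs (hanoi : String × String × String) : Option Int :=
  abfs (fuelFor (charsOf hanoi)) [(hanoi, 0)] ((∅ : VSet).insert hanoi)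

-- ===== PORT B =====
def sortedSt : St → Bool
  | (a, b, c) =>
    a.toList.all (fun x => x == 'A') && b.toList.all (fun x => x == 'B') &&
      c.toList.all (fun x => x == 'C')

def movesB : St → List St
  | (pa, pb, pc) =>
    (if pa ≠ "" then
        [(String.ofList pa.toList.dropLast, pb.push (pa.toList.getLastD 'A'), pc),
         (String.ofList pa.toList.dropLast, pb, pc.push (pa.toList.getLastD 'A'))]
      else []) ++
    (if pb ≠ "" then
        [(pa.push (pb.toList.getLastD 'A'), String.ofList pb.toList.dropLast, pc),
         (pa, String.ofList pb.toList.dropLast, pc.push (pb.toList.getLastD 'A'))]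
      else []) ++
    (if pc ≠ "" then
        [(pa.push (pc.toList.getLastD 'A'), pb, String.ofList pc.toList.dropLast),
         (pa, pb.push (pc.toList.getLastD 'A'), String.ofList pc.toList.dropLast)]
      else [])

-- the saturation loop: reach, then reach ∪ moves(reach), …; fixpoint (equal sizes) = None
-- (Python's set of states is modelled by Std.HashSet, as for A's visited set; `any` and the
-- size comparison are independent of the iteration order)
def growB (reach : VSet) : VSet :=
  (reach.toList.flatMap movesB).foldl (fun a t => a.insert t) reach

def satB : Nat → VSet → Int → Option Int
  | 0, _, _ => none
  | f + 1, reach, d =>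
    if reach.toList.any sortedSt then some d
    else
      let grown := growB reach
      if grown.size = reach.size then none
      else satB f grown (d + 1)

def bfs_alt (hanoi : String × String × String) : Option Int :=
  if (charsOf hanoi).all (fun ch => ch == 'A' || ch == 'B' || ch == 'C') then
    satB (fuelFor (charsOf hanoi)) ((∅ : VSet).insert hanoi) 0
  else none

-- ===== PRECONDITION & SPEC =====
def Spec_bfs (hanoi : String × String × String) (out : Option Int) : Prop := out = bfs_alt hanoi
instance (hanoi : String × String × String) (out : Option Int) : Decidable (Spec_bfs hanoi out) := by unfold Spec_bfs; infer_instance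

-- ===== CLAIM (what is proved, stated in full; the proofs are below) =====
def Claim_equal_bfs : Prop := ∀ (hanoi : String × String × String), Dom_bfs hanoi → Spec_bfs hanoi (bfs hanoi)

-- ===== LEMMAS AND PROOFS =====

-- Finite universe of states (proof-only: bounds the known-state sets to justify the fuel).
def allLists : Nat → List Char → List (List Char)
  | 0, _ => [[]]
  | k + 1, al => [] :: al.flatMap (fun ch => (allLists k al).map (fun t => ch :: t))

def univSt (orig : List Char) : List St :=
  ((allLists orig.length (PySem.List.dedup orig)).map String.ofList) ×ˢ
    (((allLists orig.length (PySem.List.dedup orig)).map String.ofList) ×ˢ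
      ((allLists orig.length (PySem.List.dedup orig)).map String.ofList))

-- A state is "good" when its pegs hold exactly the input's characters.
def POk (orig : List Char) (s : St) : Prop := (charsOf s).Perm orig

def measQ (qlen vsize U : Nat) : Nat := qlen + 2 * (U - vsize)

-- proof-only mirror of one visited-checked insertion / one state's expansion on A's side
def expandStep (nv : List St × VSet) (t : St) : List St × VSet :=
  if t ∈ nv.2 then nv else (nv.1 ++ [t], nv.2.insert t)

def expandOne (nv : List St × VSet) (s : St) : List St × VSet :=
  (movesB s).foldl expandStep nv

theorem sortedSt_eq (a b c : String) : sortedSt (a, b, c) = checkA a b c := rfl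

theorem dropLast_append_getLastD (l : List Char) (h : l ≠ []) :
    l.dropLast ++ [l.getLastD 'A'] = l := by
  induction l with
  | nil => exact absurd rfl h
  | cons x xs ih =>
    cases xs with
    | nil => rfl
    | cons y ys => simpa using ih (by simp)

theorem toList_ne_nil {s : String} (h : s ≠ "") : s.toList ≠ [] := by
  intro he
  exact h (String.toList_inj.mp (by simp [he]))

theorem count_split {s : String} (h : s ≠ "") (y : Char) :
    s.toList.count y = s.toList.dropLast.count y + List.count y [s.toList.getLastD 'A'] := by
  conv_lhs => rw [← dropLast_append_getLastD s.toList (toList_ne_nil h)]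
  rw [List.count_append]

theorem movesB_perm {orig : List Char} {s t : St} (ht : t ∈ movesB s) (hs : POk orig s) :
    POk orig t := by
  obtain ⟨p, q, r⟩ := s
  unfold movesB at ht
  unfold POk charsOf at hs ⊢
  rw [List.perm_iff_count] at hs ⊢
  intro y
  have hy := hs y
  rcases List.mem_append.mp ht with h' | h3
  · rcases List.mem_append.mp h' with h1 | h2
    · by_cases hp : p = ""
      · simp [hp] at h1
      · have hc := count_split hp y
        simp only [hp, ite_not] at h1
        rcases (by simpa using h1 : t = _ ∨ t = _) with rfl | rfl <;>
          · simp only [List.count_append, String.toList_push, String.toList_ofList, List.getLastD_eq_getLast?] at hc hy ⊢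
            omega
    · by_cases hq : q = ""
      · simp [hq] at h2
      · have hc := count_split hq y
        simp only [hq, ite_not] at h2
        rcases (by simpa using h2 : t = _ ∨ t = _) with rfl | rfl <;>
          · simp only [List.count_append, String.toList_push, String.toList_ofList, List.getLastD_eq_getLast?] at hc hy ⊢
            omega
  · by_cases hr : r = ""
    · simp [hr] at h3
    · have hc := count_split hr y
      simp only [hr, ite_not] at h3
      rcases (by simpa using h3 : t = _ ∨ t = _) with rfl | rfl <;>
        · simp only [List.count_append, String.toList_push, String.toList_ofList, List.getLastD_eq_getLast?] at hc hy ⊢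
          omega

theorem mem_allLists {k : Nat} {al : List Char} {l : List Char}
    (hlen : l.length ≤ k) (hmem : ∀ x ∈ l, x ∈ al) : l ∈ allLists k al := by
  induction k generalizing l with
  | zero =>
    have : l = [] := List.eq_nil_of_length_eq_zero (Nat.le_zero.mp hlen)
    subst this; simp [allLists]
  | succ k ih =>
    cases l with
    | nil => simp [allLists]
    | cons x xs =>
      simp only [allLists, List.mem_cons, List.mem_flatMap, List.mem_map]
      right
      exact ⟨x, hmem x (by simp), xs, ih (by simpa using hlen) (fun y hy => hmem y (by simp [hy])), rfl⟩

theorem mem_univSt {orig : List Char} {s : St} (hs : POk orig s) : s ∈ univSt orig := by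
  obtain ⟨p, q, r⟩ := s
  unfold POk charsOf at hs
  have hlen := hs.length_eq
  simp only [List.length_append] at hlen
  have hmem : ∀ x, x ∈ p.toList ++ q.toList ++ r.toList → x ∈ PySem.List.dedup orig := by
    intro x hx
    exact (PySem.List.mem_dedup _ _).mpr (hs.mem_iff.mp hx)
  unfold univSt
  refine List.pair_mem_product.mpr ⟨?_, List.pair_mem_product.mpr ⟨?_, ?_⟩⟩
  · exact List.mem_map.mpr ⟨p.toList,
      mem_allLists (by omega) (fun x hx => hmem x (by simp [hx])),
      String.toList_inj.mp (by simp)⟩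
  · exact List.mem_map.mpr ⟨q.toList,
      mem_allLists (by omega) (fun x hx => hmem x (by simp [hx])),
      String.toList_inj.mp (by simp)⟩
  · exact List.mem_map.mpr ⟨r.toList,
      mem_allLists (by omega) (fun x hx => hmem x (by simp [hx])),
      String.toList_inj.mp (by simp)⟩

theorem length_allLists (n : Nat) (al : List Char) :
    (allLists n al).length = sizeLists n al.length := by
  induction n with
  | zero => rfl
  | succ n ih =>
    simp only [allLists, sizeLists, List.length_cons, List.length_flatMap]
    rw [show (List.map (fun ch => ((allLists n al).map (fun t => ch :: t)).length) al)
        = List.replicate al.length (allLists n al).length from by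
          rw [show (fun ch => ((allLists n al).map (fun t => ch :: t)).length)
              = fun _ => (allLists n al).length from by funext ch; simp]
          exact List.map_const' ,
      List.sum_replicate, ih, smul_eq_mul]
    omega

theorem fuelFor_eq (orig : List Char) : fuelFor orig = 2 * (univSt orig).length + 2 := by
  unfold fuelFor univSt
  rw [List.length_product, List.length_product, List.length_map, length_allLists]
  ring

theorem size_le_univ {orig : List Char} {v : VSet}
    (hm : ∀ s ∈ v, POk orig s) : v.size ≤ (univSt orig).length := by
  rw [← Std.HashSet.length_toList]
  have hnd : v.toList.Nodup :=
    (Std.HashSet.distinct_toList (m := v)).imp (fun h => by simpa using h)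
  refine (hnd.subperm ?_).length_le
  intro s hs
  exact mem_univSt (hm s (Std.HashSet.mem_toList.mp hs))

theorem nodup_len_eq {α : Type} {l₁ l₂ : List α} (h1 : l₁.Nodup) (h2 : l₂.Nodup)
    (hm : ∀ x, x ∈ l₁ ↔ x ∈ l₂) : l₁.length = l₂.length :=
  Nat.le_antisymm ((h1.subperm (fun x hx => (hm x).mp hx)).length_le)
    ((h2.subperm (fun x hx => (hm x).mpr hx)).length_le)

theorem checkA_false_of_bad {orig : List Char} {s : St} {x : Char} (hs : POk orig s)
    (hx : x ∈ orig) (ha : x ≠ 'A') (hb : x ≠ 'B') (hc : x ≠ 'C') :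
    checkA s.1 s.2.1 s.2.2 = false := by
  obtain ⟨p, q, r⟩ := s
  unfold POk charsOf at hs
  have hx' : x ∈ p.toList ++ q.toList ++ r.toList := hs.mem_iff.mpr hx
  apply Bool.eq_false_iff.mpr
  intro hT
  simp only [checkA, Bool.and_eq_true, List.all_eq_true, beq_iff_eq] at hT
  obtain ⟨⟨h1, h2⟩, h3⟩ := hT
  rcases List.mem_append.mp hx' with h' | hr3
  · rcases List.mem_append.mp h' with h | h
    · exact ha (h1 x h)
    · exact hb (h2 x h)
  · exact hc (h3 x hr3)

-- one fold of visited-checked insertions: appended states and visited evolve together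
theorem expand_spec (ts : List St) :
    ∀ (v : VSet), ∃ (d : List St) (w : VSet),
      (∀ n : List St, ts.foldl expandStep (n, v) = (n ++ d, w)) ∧
      w.size = v.size + d.length ∧
      (∀ x, x ∈ w ↔ x ∈ v ∨ x ∈ d) ∧ (∀ t ∈ d, t ∈ ts) ∧
      d.Nodup ∧ (∀ t ∈ d, ¬ t ∈ v) ∧ (∀ t ∈ ts, t ∈ w) := by
  induction ts with
  | nil => exact fun v => ⟨[], v, fun n => by simp, by simp, fun x => by simp, by simp,
      List.nodup_nil, by simp, by simp⟩
  | cons t ts ih =>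
    intro v
    by_cases hm : t ∈ v
    · obtain ⟨d, w, h1, h2, h3, h4, h5, h6, h7⟩ := ih v
      refine ⟨d, w, fun n => ?_, h2, h3, fun u hu => List.mem_cons_of_mem _ (h4 u hu),
        h5, h6, ?_⟩
      · rw [List.foldl_cons, show expandStep (n, v) t = (n, v) from by simp [expandStep, hm]]
        exact h1 n
      · intro u hu
        rcases List.mem_cons.mp hu with rfl | hu
        · exact (h3 u).mpr (Or.inl hm)
        · exact h7 u hu
    · obtain ⟨d, w, h1, h2, h3, h4, h5, h6, h7⟩ := ih (v.insert t)
      have hsz : (v.insert t).size = v.size + 1 := by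
        simp [Std.HashSet.size_insert, hm]
      refine ⟨t :: d, w, fun n => ?_, ?_, fun x => ?_, ?_, ?_, ?_, ?_⟩
      · rw [List.foldl_cons,
          show expandStep (n, v) t = (n ++ [t], v.insert t) from by simp [expandStep, hm],
          h1 (n ++ [t])]
        simp
      · rw [h2, hsz, List.length_cons]; omega
      · rw [h3 x]
        simp only [Std.HashSet.mem_insert, beq_iff_eq, List.mem_cons]
        tauto
      · intro u hu
        rcases hu with _ | hu
        · exact List.mem_cons_self
        · exact List.mem_cons_of_mem _ (h4 u (by assumption))
      · refine List.nodup_cons.mpr ⟨fun hc => ?_, h5⟩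
        exact h6 t hc (by simp [Std.HashSet.mem_insert])
      · intro u hu
        rcases List.mem_cons.mp hu with rfl | hu
        · exact hm
        · intro hc
          exact h6 u hu (by simp [Std.HashSet.mem_insert, hc])
      · intro u hu
        rcases List.mem_cons.mp hu with rfl | hu
        · exact (h3 u).mpr (Or.inl (by simp [Std.HashSet.mem_insert]))
        · exact h7 u hu

theorem push_eq_expand (cnt : Int) (ts : List St) :
    ∀ (n : List St) (v : VSet),
      ts.foldl (pushA cnt) (n.map (fun t => (t, cnt + 1)), v)
        = (((ts.foldl expandStep (n, v)).1).map (fun t => (t, cnt + 1)),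
            (ts.foldl expandStep (n, v)).2) := by
  induction ts with
  | nil => intro n v; rfl
  | cons t ts ih =>
    intro n v
    by_cases hm : t ∈ v
    · rw [List.foldl_cons, List.foldl_cons,
        show pushA cnt (n.map (fun t => (t, cnt + 1)), v) t = (n.map (fun t => (t, cnt + 1)), v)
          from by simp [pushA, hm],
        show expandStep (n, v) t = (n, v) from by simp [expandStep, hm]]
      exact ih n v
    · rw [List.foldl_cons, List.foldl_cons,
        show pushA cnt (n.map (fun t => (t, cnt + 1)), v) t
            = ((n ++ [t]).map (fun t => (t, cnt + 1)), v.insert t) from by simp [pushA, hm],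
        show expandStep (n, v) t = (n ++ [t], v.insert t) from by simp [expandStep, hm]]
      exact ih (n ++ [t]) (v.insert t)

theorem stepA_eq (a b c : String) (cnt : Int) (v : VSet) :
    stepA a b c cnt v = (movesB (a, b, c)).foldl (pushA cnt) ([], v) := by
  by_cases ha : a = "" <;> by_cases hb : b = "" <;> by_cases hc : c = "" <;>
    simp [stepA, movesB, ha, hb, hc]

-- flushing one whole BFS level of A's queue equals expanding all its states in order
theorem flushAll (d : Int) (L : List St) :
    ∀ (N : List St) (v : VSet) (f : Nat),
    (∀ s ∈ L, checkA s.1 s.2.1 s.2.2 = false) →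
    abfs (L.length + f) (L.map (fun s => (s, d)) ++ N.map (fun s => (s, d + 1))) v
      = abfs f (((L.foldl expandOne (N, v)).1).map (fun s => (s, d + 1)))
          (L.foldl expandOne (N, v)).2 := by
  induction L with
  | nil => intro N v f _; simp
  | cons s L ih =>
    intro N v f hchk
    obtain ⟨a, b, c⟩ := s
    have hck : checkA a b c = false := hchk (a, b, c) (by simp)
    have hfl : ((a, b, c) :: L).length + f = (L.length + f) + 1 := by
      rw [List.length_cons]; omega
    rw [hfl]
    simp only [List.map_cons, List.cons_append]
    simp only [abfs, hck, Bool.false_eq_true, if_false]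
    obtain ⟨dl, w, h1, _, _, _, _, _, _⟩ := expand_spec (movesB (a, b, c)) v
    have hstep : stepA a b c d v = (dl.map (fun t => (t, d + 1)), w) := by
      rw [stepA_eq]
      have := push_eq_expand d (movesB (a, b, c)) [] v
      simp only [List.map_nil] at this
      rw [this, h1 []]
      simp
    rw [List.foldl_cons, show expandOne (N, v) (a, b, c) = (N ++ dl, w) from h1 N]
    rw [hstep]
    have hq : (L.map (fun s => (s, d)) ++ N.map (fun s => (s, d + 1)))
          ++ dl.map (fun t => (t, d + 1))
        = L.map (fun s => (s, d)) ++ (N ++ dl).map (fun s => (s, d + 1)) := by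
      simp [List.map_append]
    simp only [hq]
    exact ih (N ++ dl) w f (fun s hs => hchk s (List.mem_cons_of_mem _ hs))

-- if some state of the current level passes `check`, A returns the current count
theorem predHit (d : Int) (L : List St) :
    ∀ (N : List St) (v : VSet) (f : Nat),
    (∃ s ∈ L, checkA s.1 s.2.1 s.2.2 = true) → L.length ≤ f →
    abfs f (L.map (fun s => (s, d)) ++ N.map (fun s => (s, d + 1))) v = some d := by
  induction L with
  | nil => intro N v f hg _; simp at hg
  | cons s L ih =>
    intro N v f hg hlen
    cases f with
    | zero => rw [List.length_cons] at hlen; omega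
    | succ f =>
      obtain ⟨a, b, c⟩ := s
      simp only [List.map_cons, List.cons_append]
      by_cases hck : checkA a b c = true
      · simp [abfs, hck]
      · have hg' : ∃ s ∈ L, checkA s.1 s.2.1 s.2.2 = true := by
          obtain ⟨u, hu, hcu⟩ := hg
          rcases List.mem_cons.mp hu with rfl | hu
          · exact absurd hcu hck
          · exact ⟨u, hu, hcu⟩
        simp only [abfs, hck, Bool.false_eq_true, if_false]
        obtain ⟨dl, w, h1, _, _, _, _, _, _⟩ := expand_spec (movesB (a, b, c)) v
        have hstep : stepA a b c d v = (dl.map (fun t => (t, d + 1)), w) := by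
          rw [stepA_eq]
          have := push_eq_expand d (movesB (a, b, c)) [] v
          simp only [List.map_nil] at this
          rw [this, h1 []]
          simp
        rw [hstep]
        have hq : (L.map (fun s => (s, d)) ++ N.map (fun s => (s, d + 1)))
              ++ dl.map (fun t => (t, d + 1))
            = L.map (fun s => (s, d)) ++ (N ++ dl).map (fun s => (s, d + 1)) := by
          simp [List.map_append]
        simp only [hq]
        exact ih (N ++ dl) w f hg' (by rw [List.length_cons] at hlen; omega)

theorem level_expand (L : List St) :
    ∀ (v : VSet), ∃ (dl : List St) (w : VSet),
      (∀ n : List St, L.foldl expandOne (n, v) = (n ++ dl, w)) ∧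
      w.size = v.size + dl.length ∧
      (∀ x, x ∈ w ↔ x ∈ v ∨ x ∈ dl) ∧
      (∀ t ∈ dl, ∃ s ∈ L, t ∈ movesB s) ∧
      dl.Nodup ∧ (∀ t ∈ dl, ¬ t ∈ v) ∧ (∀ s ∈ L, ∀ t ∈ movesB s, t ∈ w) := by
  induction L with
  | nil => exact fun v => ⟨[], v, fun n => by simp, by simp, fun x => by simp, by simp,
      List.nodup_nil, by simp, by simp⟩
  | cons s L ih =>
    intro v
    obtain ⟨d1, w1, h1, hs1, hm1, hb1, hn1, hd1, hc1⟩ := expand_spec (movesB s) v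
    obtain ⟨d2, w2, h2, hs2, hm2, hb2, hn2, hd2, hc2⟩ := ih w1
    refine ⟨d1 ++ d2, w2, fun n => ?_, ?_, fun x => ?_, ?_, ?_, ?_, ?_⟩
    · rw [List.foldl_cons, show expandOne (n, v) s = (n ++ d1, w1) from h1 n, h2 (n ++ d1)]
      simp
    · rw [hs2, hs1, List.length_append]; omega
    · rw [hm2 x, hm1 x, List.mem_append]; tauto
    · intro t ht
      rcases List.mem_append.mp ht with h | h
      · exact ⟨s, List.mem_cons_self, hb1 t h⟩
      · obtain ⟨s', hs', hm⟩ := hb2 t h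
        exact ⟨s', List.mem_cons_of_mem _ hs', hm⟩
    · refine List.Nodup.append hn1 hn2 ?_
      intro t ht1 ht2
      exact hd2 t ht2 ((hm1 t).mpr (Or.inr ht1))
    · intro t ht
      rcases List.mem_append.mp ht with h | h
      · exact hd1 t h
      · intro hc
        exact hd2 t h ((hm1 t).mpr (Or.inl hc))
    · intro s' hs' t ht
      rcases List.mem_cons.mp hs' with rfl | hs'
      · exact (hm2 t).mpr (Or.inl (hc1 t ht))
      · exact hc2 s' hs' t ht

-- a fold of HashSet.insert adds exactly the not-yet-present elements
theorem insertFold_spec (ts : List St) :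
    ∀ (v : VSet), ∃ e : List St,
      (ts.foldl (fun a t => a.insert t) v).size = v.size + e.length ∧
      (∀ x, x ∈ ts.foldl (fun a t => a.insert t) v ↔ x ∈ v ∨ x ∈ e) ∧
      e.Nodup ∧ (∀ x ∈ e, x ∈ ts ∧ ¬ x ∈ v) ∧
      (∀ t ∈ ts, t ∈ ts.foldl (fun a t => a.insert t) v) := by
  induction ts with
  | nil =>
    intro v
    exact ⟨[], by simp, fun x => by simp, List.nodup_nil, by simp, by simp⟩
  | cons t ts ih =>
    intro v
    obtain ⟨e, h1, h2, h3, h4, h5⟩ := ih (v.insert t)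
    have hself : t ∈ v.insert t := Std.HashSet.mem_insert.mpr (Or.inl (by simp))
    by_cases hm : t ∈ v
    · have hieq : ∀ x : St, x ∈ v.insert t ↔ x ∈ v := by
        intro x
        rw [Std.HashSet.mem_insert]
        simp only [beq_iff_eq]
        constructor
        · rintro (rfl | h)
          · exact hm
          · exact h
        · exact Or.inr
      have hisz : (v.insert t).size = v.size := by simp [Std.HashSet.size_insert, hm]
      refine ⟨e, ?_, fun x => ?_, h3, fun x hx => ?_, fun u hu => ?_⟩
      · rw [List.foldl_cons, h1, hisz]
      · rw [List.foldl_cons, h2 x, hieq x]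
      · obtain ⟨ha, hb⟩ := h4 x hx
        exact ⟨List.mem_cons_of_mem _ ha, fun hc => hb ((hieq x).mpr hc)⟩
      · rw [List.foldl_cons]
        rcases List.mem_cons.mp hu with rfl | hu
        · exact (h2 u).mpr (Or.inl hself)
        · exact h5 u hu
    · have hisz : (v.insert t).size = v.size + 1 := by simp [Std.HashSet.size_insert, hm]
      refine ⟨t :: e, ?_, fun x => ?_, ?_, fun x hx => ?_, fun u hu => ?_⟩
      · rw [List.foldl_cons, h1, hisz, List.length_cons]; omega
      · rw [List.foldl_cons, h2 x, Std.HashSet.mem_insert]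
        simp only [beq_iff_eq, List.mem_cons]
        tauto
      · refine List.nodup_cons.mpr ⟨fun hc => ?_, h3⟩
        exact (h4 t hc).2 hself
      · rcases List.mem_cons.mp hx with rfl | hx
        · exact ⟨List.mem_cons_self, hm⟩
        · obtain ⟨ha, hb⟩ := h4 x hx
          exact ⟨List.mem_cons_of_mem _ ha,
            fun hc => hb (Std.HashSet.mem_insert.mpr (Or.inr hc))⟩
      · rw [List.foldl_cons]
        rcases List.mem_cons.mp hu with rfl | hu
        · exact (h2 u).mpr (Or.inl hself)
        · exact h5 u hu

-- the simulation: A's queue-BFS equals B's ball saturation, given enough fuel on both sides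
theorem satSim (orig : List Char) :
    ∀ (g : Nat) (fr : List St) (v : VSet) (r : VSet) (d : Int) (f : Nat),
    (∀ x : St, x ∈ v ↔ x ∈ r) →
    (∀ s ∈ fr, s ∈ r) →
    (∀ s : St, s ∈ r → s ∉ fr → ∀ t ∈ movesB s, t ∈ r) →
    (∀ s : St, s ∈ r → s ∉ fr → checkA s.1 s.2.1 s.2.2 = false) →
    (∀ s : St, s ∈ r → POk orig s) →
    measQ fr.length v.size (univSt orig).length ≤ f →
    (univSt orig).length - r.size + 1 ≤ g →
    abfs f (fr.map (fun s => (s, d))) v = satB g r d := by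
  intro g
  induction g with
  | zero => intro fr v r d f _ _ _ _ _ _ hg; omega
  | succ g ih =>
    intro fr v r d f hvr hfr hcl hchk hpok hf hg
    by_cases hany : r.toList.any sortedSt = true
    · -- some reached state is sorted; by the interior-check invariant it lies in the frontier
      obtain ⟨s, hs, hsort⟩ := List.any_eq_true.mp hany
      have hsr : s ∈ r := Std.HashSet.mem_toList.mp hs
      obtain ⟨a, b, c⟩ := s
      rw [sortedSt_eq] at hsort
      have hsfr : (a, b, c) ∈ fr := by
        by_contra hc
        rw [hchk (a, b, c) hsr hc] at hsort
        exact Bool.false_ne_true hsort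
      rw [satB, if_pos hany]
      have hlen : fr.length ≤ f := by unfold measQ at hf; omega
      have := predHit d fr [] v f ⟨(a, b, c), hsfr, hsort⟩ hlen
      simpa using this
    · have hchkfr : ∀ s ∈ fr, checkA s.1 s.2.1 s.2.2 = false := by
        intro s hsf
        apply Bool.eq_false_iff.mpr
        intro ht
        obtain ⟨a, b, c⟩ := s
        exact hany (List.any_eq_true.mpr ⟨(a, b, c), Std.HashSet.mem_toList.mpr (hfr _ hsf),
          by rw [sortedSt_eq]; exact ht⟩)
      obtain ⟨dl, w, e1, hsz, hmem, hsub, hndl, hdisj, hcov⟩ := level_expand fr v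
      obtain ⟨e, g1, g2, g3, g4, g5⟩ := insertFold_spec (r.toList.flatMap movesB) r
      have hgrow : growB r = (r.toList.flatMap movesB).foldl (fun a t => a.insert t) r := rfl
      -- members of the new frontier dl = members of the newly inserted block e
      have hed : ∀ x : St, x ∈ e ↔ x ∈ dl := by
        intro x
        constructor
        · intro hx
          obtain ⟨hx1, hx2⟩ := g4 x hx
          obtain ⟨s, hsr, hms⟩ := List.mem_flatMap.mp hx1
          have hsr' : s ∈ r := Std.HashSet.mem_toList.mp hsr
          have hsfr : s ∈ fr := by
            by_contra hc
            exact hx2 (hcl s hsr' hc x hms)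
          have hxw : x ∈ w := hcov s hsfr x hms
          rcases (hmem x).mp hxw with h | h
          · exact absurd ((hvr x).mp h) hx2
          · exact h
        · intro hx
          obtain ⟨s, hsf, hms⟩ := hsub x hx
          have hxts : x ∈ r.toList.flatMap movesB :=
            List.mem_flatMap.mpr ⟨s, Std.HashSet.mem_toList.mpr (hfr s hsf), hms⟩
          rcases (g2 x).mp (g5 x hxts) with h | h
          · exact absurd h (fun hh => hdisj x hx ((hvr x).mpr hh))
          · exact h
      have hlen_ed : e.length = dl.length := nodup_len_eq g3 hndl hed
      -- POk everywhere in the grown ball and in w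
      have hpok' : ∀ s : St, s ∈ growB r → POk orig s := by
        intro s hs
        rw [hgrow] at hs
        rcases (g2 s).mp hs with h | h
        · exact hpok s h
        · obtain ⟨s', hs', hms⟩ := hsub s ((hed s).mp h)
          exact movesB_perm hms (hpok s' (hfr s' hs'))
      have hwpok : ∀ s ∈ w, POk orig s := by
        intro s hsw
        rcases (hmem s).mp hsw with h | h
        · exact hpok s ((hvr s).mp h)
        · obtain ⟨s', hs', hms⟩ := hsub s h
          exact movesB_perm hms (hpok s' (hfr s' hs'))
      have hwU : w.size ≤ (univSt orig).length := size_le_univ hwpok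
      have hgU : (growB r).size ≤ (univSt orig).length := size_le_univ hpok'
      have hgsize : (growB r).size = r.size + e.length := by rw [hgrow, g1]
      rw [satB]
      simp only [hany, Bool.false_eq_true, if_false]
      have hlenfr : fr.length ≤ f := by unfold measQ at hf; omega
      have hflush := flushAll d fr [] v (f - fr.length) hchkfr
      rw [show fr.length + (f - fr.length) = f from by omega, e1 []] at hflush
      simp only [List.nil_append, List.map_nil, List.append_nil] at hflush
      by_cases hfx : e = []
      · -- fixpoint: nothing new, both sides return none
        have hdl : dl = [] := List.eq_nil_iff_forall_not_mem.mpr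
          (fun x hx => by rw [← hed x, hfx] at hx; simp at hx)
        rw [if_pos (by rw [hgsize, hfx]; simp), hflush, hdl]
        cases f - fr.length <;> simp [abfs]
      · -- the ball grew: both sides step to the next radius
        have helen : 1 ≤ e.length := List.length_pos_iff.mpr hfx
        rw [if_neg (by rw [hgsize]; omega), hflush]
        apply ih dl w (growB r) (d + 1) (f - fr.length)
        · intro x
          rw [hmem x, hvr x, hgrow, g2 x]
          rw [hed x]
        · intro s hsd
          rw [hgrow]
          exact (g2 s).mpr (Or.inr ((hed s).mpr hsd))
        · -- closure: moves of everything outside the new frontier are already in the ball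
          intro s hsg hsnd t ht
          rw [hgrow] at hsg ⊢
          rcases (g2 s).mp hsg with h | h
          · by_cases hsf : s ∈ fr
            · have htw : t ∈ w := hcov s hsf t ht
              rcases (hmem t).mp htw with h' | h'
              · exact (g2 t).mpr (Or.inl ((hvr t).mp h'))
              · exact (g2 t).mpr (Or.inr ((hed t).mpr h'))
            · exact (g2 t).mpr (Or.inl (hcl s h hsf t ht))
          · exact absurd ((hed s).mp h) hsnd
        · -- every state outside the new frontier has been checked in an earlier round
          intro s hsg hsnd
          rw [hgrow] at hsg
          rcases (g2 s).mp hsg with h | h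
          · by_cases hsf : s ∈ fr
            · exact hchkfr s hsf
            · exact hchk s h hsf
          · exact absurd ((hed s).mp h) hsnd
        · exact hpok'
        · unfold measQ at hf ⊢
          rw [← hlen_ed] at hsz
          omega
        · rw [hgsize]
          rw [hgsize] at hgU
          omega

-- with a character outside 'ABC' on the pegs no state ever passes `check`: A exhausts and returns none
theorem noGoal (orig : List Char) {x : Char} (hx : x ∈ orig)
    (ha : x ≠ 'A') (hb : x ≠ 'B') (hc : x ≠ 'C') (f : Nat) :
    ∀ (q : List (St × Int)) (v : VSet), (∀ p ∈ q, POk orig p.1) →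
    (∀ s ∈ v, POk orig s) →
    measQ q.length v.size (univSt orig).length ≤ f →
    abfs f q v = none := by
  induction f with
  | zero => intro q v _ _ _; rfl
  | succ f ih =>
    intro q v hqp hvp hm
    cases q with
    | nil => simp [abfs]
    | cons p rest =>
      obtain ⟨⟨a, b, c⟩, cnt⟩ := p
      have hck : checkA a b c = false :=
        checkA_false_of_bad (orig := orig) (hqp ((a, b, c), cnt) (by simp)) hx ha hb hc
      simp only [abfs, hck, Bool.false_eq_true, if_false]
      obtain ⟨dl, w, h1, hsz, hmem, hsub, _, _, _⟩ := expand_spec (movesB (a, b, c)) v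
      have hstep : stepA a b c cnt v = (dl.map (fun t => (t, cnt + 1)), w) := by
        rw [stepA_eq]
        have := push_eq_expand cnt (movesB (a, b, c)) [] v
        simp only [List.map_nil] at this
        rw [this, h1 []]
        simp
      rw [hstep]
      have hPdl : ∀ t ∈ dl, POk orig t := by
        intro t ht
        exact movesB_perm (hsub t ht) (hqp ((a, b, c), cnt) (by simp))
      have hPw : ∀ s ∈ w, POk orig s := by
        intro s hs
        rcases (hmem s).mp hs with h | h
        · exact hvp s h
        · exact hPdl s h
      have hUb : w.size ≤ (univSt orig).length := size_le_univ hPw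
      apply ih
      · intro p hp
        rcases List.mem_append.mp hp with h | h
        · exact hqp p (List.mem_cons_of_mem _ h)
        · obtain ⟨t, ht, rfl⟩ := List.mem_map.mp h
          exact hPdl t ht
      · exact hPw
      · simp only [List.length_append, List.length_map]
        unfold measQ at hm ⊢
        simp only [List.length_cons] at hm
        omega

theorem main_eq (s : St) :
    abfs (fuelFor (charsOf s)) [(s, 0)] ((∅ : VSet).insert s)
      = (if (charsOf s).all (fun ch => ch == 'A' || ch == 'B' || ch == 'C') then
          satB (fuelFor (charsOf s)) ((∅ : VSet).insert s) 0
        else none) := by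
  have hP0 : POk (charsOf s) s := List.Perm.refl _
  have hU : 0 < (univSt (charsOf s)).length := List.length_pos_of_mem (mem_univSt hP0)
  have hsz : ((∅ : VSet).insert s).size = 1 := by
    simp [Std.HashSet.size_insert]
  have hmem1 : ∀ u : St, u ∈ (∅ : VSet).insert s ↔ u = s := by
    intro u
    rw [Std.HashSet.mem_insert]
    simp only [beq_iff_eq, Std.HashSet.not_mem_empty, or_false]
    exact eq_comm
  have := satSim (charsOf s) (fuelFor (charsOf s)) [s] ((∅ : VSet).insert s)
    ((∅ : VSet).insert s) 0 (fuelFor (charsOf s))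
    (fun _ => Iff.rfl)
    (fun u hu => by rw [List.mem_singleton.mp hu]; exact (hmem1 s).mpr rfl)
    (fun u hu hnu => absurd (by rw [(hmem1 u).mp hu]; exact List.mem_singleton.mpr rfl) hnu)
    (fun u hu hnu => absurd (by rw [(hmem1 u).mp hu]; exact List.mem_singleton.mpr rfl) hnu)
    (fun u hu => by rw [(hmem1 u).mp hu]; exact hP0)
    (by rw [fuelFor_eq, hsz]; unfold measQ; simp only [List.length_singleton]; omega)
    (by rw [fuelFor_eq, hsz]; omega)
  by_cases hall : (charsOf s).all (fun ch => ch == 'A' || ch == 'B' || ch == 'C') = true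
  · rw [if_pos hall]
    simpa using this
  · rw [if_neg hall]
    obtain ⟨x, hx, hxp⟩ := List.all_eq_false.mp (Bool.eq_false_iff.mpr hall)
    simp only [Bool.or_eq_true, beq_iff_eq, not_or] at hxp
    obtain ⟨⟨h1, h2⟩, h3⟩ := hxp
    apply noGoal (charsOf s) hx h1 h2 h3 (fuelFor (charsOf s)) [(s, 0)] ((∅ : VSet).insert s)
    · intro p hp
      rw [show p = ((s, 0) : St × Int) from List.mem_singleton.mp hp]
      exact hP0
    · intro u hu
      rw [(hmem1 u).mp hu]
      exact hP0
    · rw [fuelFor_eq, hsz]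
      unfold measQ
      simp only [List.length_cons, List.length_nil]
      omega

-- ===== VERDICT (by name: the statement is the Claim_ definition above) =====
theorem bfs_spec : Claim_equal_bfs := by
  intro hanoi _
  unfold Spec_bfs bfs bfs_alt
  exact main_eq hanoi
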